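-- pv_equiv track=rewrite | github.com/niboon39/warehouse | warehouse_38.py | check_index_harbor_ariport_train
-- ===== SOURCE A (Python) =====
-- class World: # BaseClass
--
--     def __init__(self):
--
--         self.named_harbor = []
--         self.named_airport = []
--         self.named_train_Station = []
--
--         self.named_warehouse = []
--         self.Station_start = []
--         self.Station_end = []
--         self.Station_dist = []
--         self.orders = []
--         self.slots = []
--
--         self.named_truck = []
--         self.items_1 = []
--         self.items_2 = []
--
--         self.named_item_name = []
--         self.min_temp = []
--         self.max_temp = []
--         self.weight = []
--
--         # List of countries
--         # Airport
--         self.First_airport = ['USA', 'UK', 'Italy']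
--         self.Second_airport = ['Wakanda', 'Germany', 'USSR']
--         self.Third_airport = ['Brazil', 'Argentina', 'Ireland']
--
--         # Harbor
--         self.First_harbor = ['India', 'Indonesia', 'Hong Kong']
--         self.Second_harbor = ['Philipine', 'Singapore', 'Sri Lanka']
--         self.Third_harbor = ['Egypt', 'Congo', 'Madagasgar']
--
--         # Train station
--         self.First_train_station = ['Vietnam', 'China', 'Laos']
--         self.Second_train_station = ['Hungary', 'Austria', 'Myanmar']
--         self.Third_train_station = ['Bulgaria', 'Poland', 'Latvia']
--
-- def check_index_harbor_ariport_train(T):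
--     txt = ''
--     ind = 0
--     w = World()
--     for i in w.First_airport:
--         if(T == i):
--             ind = 0
--             txt = 'Airport'
--             break
--     for i in w.Second_airport:
--         if(T == i):
--             ind = 1
--             txt = 'Airport'
--             break
--     for i in w.Third_airport:
--         if(T == i):
--             ind = 2
--             txt = 'Airport'
--             break
--
--     for i in w.First_harbor:
--         if(T == i):
--             ind = 0
--             txt = 'Harbor'
--             break
--     for i in w.Second_harbor:
--         if(T == i):
--             ind = 1
--             txt = 'Harbor'
--             break
--     for i in w.Third_harbor:
--         if(T == i):
--             ind = 2
--             txt = 'Harbor'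
--             break
--
--     for i in w.First_train_station:
--         if(T == i):
--             ind = 0
--             txt = 'Train_Station'
--             break
--     for i in w.Second_train_station:
--         if(T == i):
--             ind = 1
--             txt = 'Train_Station'
--             break
--     for i in w.Third_train_station:
--         if(T == i):
--             ind = 2
--             txt = 'Train_Station'
--             break
--     return ind, txt
-- ===== SOURCE B (Python) =====
-- # B: one flat ordered list of all 27 countries; the answer is computed
-- # arithmetically from the position: kind = p // 9, index = (p % 9) // 3.
-- _FLAT = [
--     'USA', 'UK', 'Italy', 'Wakanda', 'Germany', 'USSR',
--     'Brazil', 'Argentina', 'Ireland',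
--     'India', 'Indonesia', 'Hong Kong', 'Philipine', 'Singapore', 'Sri Lanka',
--     'Egypt', 'Congo', 'Madagasgar',
--     'Vietnam', 'China', 'Laos', 'Hungary', 'Austria', 'Myanmar',
--     'Bulgaria', 'Poland', 'Latvia',
-- ]
-- _KINDS = ['Airport', 'Harbor', 'Train_Station']
--
-- def check_index_harbor_ariport_train(T):
--     try:
--         p = _FLAT.index(T)
--     except ValueError:
--         return 0, ''
--     return (p % 9) // 3, _KINDS[p // 9]
-- ===== Notes on version B (the rewrite author's own statement) =====
-- stated objective: alternative
-- what changed: Instead of nine scans (or any stored (index,type) pairs), B locates T in one flat ordered list of all 27 names and computes the result arithmetically from the position: index = (p % 9) // 3 and kind = KINDS[p // 9].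
import Mathlib
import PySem

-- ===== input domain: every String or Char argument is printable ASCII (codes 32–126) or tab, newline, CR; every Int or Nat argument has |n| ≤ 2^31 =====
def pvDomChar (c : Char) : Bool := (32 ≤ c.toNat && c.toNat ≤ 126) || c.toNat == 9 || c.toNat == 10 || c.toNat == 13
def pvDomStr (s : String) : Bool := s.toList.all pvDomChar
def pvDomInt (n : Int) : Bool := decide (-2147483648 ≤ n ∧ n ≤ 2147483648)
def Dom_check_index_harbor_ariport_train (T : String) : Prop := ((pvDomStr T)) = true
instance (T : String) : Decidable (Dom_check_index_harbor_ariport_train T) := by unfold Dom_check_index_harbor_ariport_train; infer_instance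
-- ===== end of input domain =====

-- B replaces A's nine scans with mutable state by one flat ordered list of all 27 names
-- and computes the answer arithmetically from the position (alternative, same cost).

-- ===== PORT A =====
-- one Python 'for i in lst: if T == i: ind, txt = v; break' loop: first match sets the state, else keep it
def pvScan (T : String) (lst : List String) (v : Int × String) (st : Int × String) : Int × String :=
  match lst with
  | [] => st
  | i :: rest => if T = i then v else pvScan T rest v st

def check_index_harbor_ariport_train (T : String) : Int × String :=
  let st0 : Int × String := (0, "")
  let st1 := pvScan T ["USA", "UK", "Italy"] (0, "Airport") st0
  let st2 := pvScan T ["Wakanda", "Germany", "USSR"] (1, "Airport") st1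
  let st3 := pvScan T ["Brazil", "Argentina", "Ireland"] (2, "Airport") st2
  let st4 := pvScan T ["India", "Indonesia", "Hong Kong"] (0, "Harbor") st3
  let st5 := pvScan T ["Philipine", "Singapore", "Sri Lanka"] (1, "Harbor") st4
  let st6 := pvScan T ["Egypt", "Congo", "Madagasgar"] (2, "Harbor") st5
  let st7 := pvScan T ["Vietnam", "China", "Laos"] (0, "Train_Station") st6
  let st8 := pvScan T ["Hungary", "Austria", "Myanmar"] (1, "Train_Station") st7
  pvScan T ["Bulgaria", "Poland", "Latvia"] (2, "Train_Station") st8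

-- ===== PORT B =====
def pvFlat : List String :=
  ["USA", "UK", "Italy", "Wakanda", "Germany", "USSR",
   "Brazil", "Argentina", "Ireland",
   "India", "Indonesia", "Hong Kong", "Philipine", "Singapore", "Sri Lanka",
   "Egypt", "Congo", "Madagasgar",
   "Vietnam", "China", "Laos", "Hungary", "Austria", "Myanmar",
   "Bulgaria", "Poland", "Latvia"]

def pvKinds : List String := ["Airport", "Harbor", "Train_Station"]

-- Source B's try: p = _FLAT.index(T) except ValueError: return 0, '' is exactly the
-- none/some match on PySem.List.index?; p is a nonnegative position, so Nat % and /
-- coincide with Python's % and //; _KINDS[p // 9] with p ≤ 26 is always in range,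
-- so the pyGet? lookup never takes the getD default.
def check_index_harbor_ariport_train_alt (T : String) : Int × String :=
  match PySem.List.index? pvFlat T with
  | none => (0, "")
  | some p => (((p % 9) / 3 : Nat), (PySem.List.pyGet? pvKinds ((p / 9 : Nat) : Int)).getD "")

-- ===== PRECONDITION & SPEC =====
def Spec_check_index_harbor_ariport_train (T : String) (out : Int × String) : Prop := out = check_index_harbor_ariport_train_alt T
instance (T : String) (out : Int × String) : Decidable (Spec_check_index_harbor_ariport_train T out) := by unfold Spec_check_index_harbor_ariport_train; infer_instance

-- ===== CLAIM =====
def Claim_equal_check_index_harbor_ariport_train : Prop := ∀ (T : String), Dom_check_index_harbor_ariport_train T → Spec_check_index_harbor_ariport_train T (check_index_harbor_ariport_train T)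

-- ===== LEMMAS AND PROOFS =====

-- ===== VERDICT =====
theorem check_index_harbor_ariport_train_spec : Claim_equal_check_index_harbor_ariport_train := by
  intro T _
  unfold Spec_check_index_harbor_ariport_train check_index_harbor_ariport_train
    check_index_harbor_ariport_train_alt
  rcases eq_or_ne T "USA" with h1 | h1
  · subst h1; decide
  rcases eq_or_ne T "UK" with h2 | h2
  · subst h2; decide
  rcases eq_or_ne T "Italy" with h3 | h3
  · subst h3; decide
  rcases eq_or_ne T "Wakanda" with h4 | h4
  · subst h4; decide
  rcases eq_or_ne T "Germany" with h5 | h5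
  · subst h5; decide
  rcases eq_or_ne T "USSR" with h6 | h6
  · subst h6; decide
  rcases eq_or_ne T "Brazil" with h7 | h7
  · subst h7; decide
  rcases eq_or_ne T "Argentina" with h8 | h8
  · subst h8; decide
  rcases eq_or_ne T "Ireland" with h9 | h9
  · subst h9; decide
  rcases eq_or_ne T "India" with h10 | h10
  · subst h10; decide
  rcases eq_or_ne T "Indonesia" with h11 | h11
  · subst h11; decide
  rcases eq_or_ne T "Hong Kong" with h12 | h12
  · subst h12; decide
  rcases eq_or_ne T "Philipine" with h13 | h13
  · subst h13; decide
  rcases eq_or_ne T "Singapore" with h14 | h14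
  · subst h14; decide
  rcases eq_or_ne T "Sri Lanka" with h15 | h15
  · subst h15; decide
  rcases eq_or_ne T "Egypt" with h16 | h16
  · subst h16; decide
  rcases eq_or_ne T "Congo" with h17 | h17
  · subst h17; decide
  rcases eq_or_ne T "Madagasgar" with h18 | h18
  · subst h18; decide
  rcases eq_or_ne T "Vietnam" with h19 | h19
  · subst h19; decide
  rcases eq_or_ne T "China" with h20 | h20
  · subst h20; decide
  rcases eq_or_ne T "Laos" with h21 | h21
  · subst h21; decide
  rcases eq_or_ne T "Hungary" with h22 | h22
  · subst h22; decide
  rcases eq_or_ne T "Austria" with h23 | h23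
  · subst h23; decide
  rcases eq_or_ne T "Myanmar" with h24 | h24
  · subst h24; decide
  rcases eq_or_ne T "Bulgaria" with h25 | h25
  · subst h25; decide
  rcases eq_or_ne T "Poland" with h26 | h26
  · subst h26; decide
  rcases eq_or_ne T "Latvia" with h27 | h27
  · subst h27; decide
  have hmem : T ∉ pvFlat := by
    simp [pvFlat, h1, h2, h3, h4, h5, h6, h7, h8, h9, h10, h11, h12, h13, h14, h15, h16, h17,
      h18, h19, h20, h21, h22, h23, h24, h25, h26, h27]
  rw [show PySem.List.index? pvFlat T = none from
    (PySem.List.index?_eq_none_iff pvFlat T).mpr hmem]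
  simp only [pvScan, h1, h2, h3, h4, h5, h6, h7, h8, h9, h10, h11, h12, h13, h14, h15, h16, h17,
    h18, h19, h20, h21, h22, h23, h24, h25, h26, h27, if_false]
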